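-- pv_equiv track=rewrite | github.com/alyeavui/Web-Dev | lab7_WD/informatics/arrays/baloons.py | count_destroyed
-- ===== SOURCE A (Python) =====
-- def count_destroyed(balls):
--     i = 0
--     while i < len(balls) - 2:
--         j = i
--         while j < len(balls) and balls[j] == balls[i]:
--             j += 1
--         if j - i >= 3:
--             return j - i
--         i = j
--     return 0
-- ===== SOURCE B (Python) =====
-- def count_destroyed(balls):
--     # stage 1: locate the first index where three adjacent balls are equal
--     # (exactly the start of the first run of length >= 3, if any)
--     trip = next(
--         (i for i, (a, b, c) in enumerate(zip(balls, balls[1:], balls[2:]))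
--          if a == b == c),
--         None,
--     )
--     if trip is None:
--         return 0
--     # stage 2: find that run's right boundary
--     v = balls[trip]
--     end = next((k for k in range(trip + 3, len(balls)) if balls[k] != v),
--                len(balls))
--     return end - trip
-- ===== Notes on version B (the rewrite author's own statement) =====
-- stated objective: alternative
-- what changed: B works in two stages: a scan over adjacent triples (balls[i]==balls[i+1]==balls[i+2]) locates the start of the first run of length >= 3 (such an index is necessarily a run start), then a boundary search finds where that run ends; A instead enumerates every run with nested index-jumping while loops and measures each run's length.
import Mathlib
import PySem

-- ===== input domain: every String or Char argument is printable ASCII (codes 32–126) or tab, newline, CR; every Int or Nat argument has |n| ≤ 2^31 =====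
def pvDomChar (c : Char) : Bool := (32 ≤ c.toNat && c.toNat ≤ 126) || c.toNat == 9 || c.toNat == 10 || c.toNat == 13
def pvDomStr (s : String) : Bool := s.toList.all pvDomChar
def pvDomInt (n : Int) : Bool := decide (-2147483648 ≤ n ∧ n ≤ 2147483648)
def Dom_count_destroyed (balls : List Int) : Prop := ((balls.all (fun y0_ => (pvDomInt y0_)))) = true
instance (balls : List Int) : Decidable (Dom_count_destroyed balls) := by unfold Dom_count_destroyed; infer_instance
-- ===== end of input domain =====

-- B locates the first adjacent equal triple (the start of the first run of length ≥ 3)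
-- and then searches for that run's right boundary, instead of A's nested-while run
-- enumeration (alternative algorithm, same cost).


-- ===== PORT A =====
-- inner while loop: 'while j < len(balls) and balls[j] == balls[i]: j += 1'
-- (balls.getD j 0 is exact: the index is guarded by j < balls.length; fuel only
-- totalizes the loop — it starts at balls.length - j, which never runs out)
def pvInner (balls : List Int) (v : Int) (fuel : Nat) (j : Nat) : Nat :=
  match fuel with
  | 0 => j
  | f + 1 => if j < balls.length ∧ balls.getD j 0 = v then pvInner balls v f (j + 1) else j

-- outer while loop: 'while i < len(balls) - 2: … i = j' (fuel totalizes it)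
def pvOuter (balls : List Int) (fuel : Nat) (i : Nat) : Int :=
  match fuel with
  | 0 => 0
  | f + 1 =>
    if i < balls.length - 2 then
      let j := pvInner balls (balls.getD i 0) (balls.length - i) i
      if (j : Int) - (i : Int) ≥ 3 then (j : Int) - (i : Int) else pvOuter balls f j
    else 0

def count_destroyed (balls : List Int) : Int := pvOuter balls (balls.length + 1) 0

-- ===== PORT B =====
-- 'next((i for i, (a, b, c) in enumerate(zip(balls, balls[1:], balls[2:])) if a == b == c), None)':
-- first index i (i + 2 < len) with balls[i] == balls[i+1] == balls[i+2]
-- (getD is exact: all three indices are guarded by i + 2 < balls.length; fuel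
-- only totalizes the scan — it starts at balls.length and never runs out)
def pvFindTrip (balls : List Int) (fuel : Nat) (i : Nat) : Option Nat :=
  match fuel with
  | 0 => none
  | f + 1 =>
    if i + 2 < balls.length then
      if balls.getD i 0 = balls.getD (i + 1) 0 ∧ balls.getD (i + 1) 0 = balls.getD (i + 2) 0
      then some i
      else pvFindTrip balls f (i + 1)
    else none

-- 'next((k for k in range(trip + 3, len(balls)) if balls[k] != v), len(balls))'
def pvEnd (balls : List Int) (v : Int) (fuel : Nat) (k : Nat) : Nat :=
  match fuel with
  | 0 => balls.length
  | f + 1 =>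
    if k < balls.length then
      if balls.getD k 0 ≠ v then k else pvEnd balls v f (k + 1)
    else balls.length

def count_destroyed_alt (balls : List Int) : Int :=
  match pvFindTrip balls balls.length 0 with
  | none => 0
  | some t => ((pvEnd balls (balls.getD t 0) balls.length (t + 3) : Int) - (t : Int))

-- ===== PRECONDITION & SPEC =====
def Spec_count_destroyed (balls : List Int) (out : Int) : Prop := out = count_destroyed_alt balls
instance (balls : List Int) (out : Int) : Decidable (Spec_count_destroyed balls out) := by unfold Spec_count_destroyed; infer_instance

-- ===== CLAIM (what is proved, stated in full; the proofs are below) =====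
def Claim_equal_count_destroyed : Prop := ∀ (balls : List Int), Dom_count_destroyed balls → Spec_count_destroyed balls (count_destroyed balls)

-- ===== LEMMAS AND PROOFS =====

theorem pvInner_ge (balls : List Int) (v : Int) :
    ∀ fuel j, j ≤ pvInner balls v fuel j := by
  intro fuel
  induction fuel with
  | zero => intro j; simp [pvInner]
  | succ f ih =>
    intro j
    rw [pvInner]
    split
    · exact le_trans (by omega) (ih (j + 1))
    · exact le_refl _

-- with adequate fuel, the inner while loop returns the end of the run of value v starting at j
theorem pvInner_spec (balls : List Int) (v : Int) :
    ∀ fuel j, j ≤ balls.length → balls.length ≤ j + fuel →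
    j ≤ pvInner balls v fuel j ∧ pvInner balls v fuel j ≤ balls.length ∧
    (∀ k, j ≤ k → k < pvInner balls v fuel j → balls.getD k 0 = v) ∧
    (pvInner balls v fuel j < balls.length → balls.getD (pvInner balls v fuel j) 0 ≠ v) := by
  intro fuel
  induction fuel with
  | zero =>
    intro j hj hf
    have : j = balls.length := by omega
    subst this
    refine ⟨le_refl _, le_refl _, ?_, ?_⟩ <;> simp [pvInner] <;> omega
  | succ f ih =>
    intro j hj hf
    rw [pvInner]
    split
    · next h =>
      obtain ⟨h1, h2, h3, h4⟩ := ih (j + 1) (by omega) (by omega)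
      refine ⟨by omega, h2, ?_, h4⟩
      intro k hk1 hk2
      rcases Nat.eq_or_lt_of_le hk1 with rfl | hk
      · exact h.2
      · exact h3 k hk hk2
    · next h =>
      refine ⟨le_refl _, hj, by omega, ?_⟩
      intro hjl
      by_contra hv
      exact h ⟨hjl, hv⟩

theorem pvInner_gt (balls : List Int) (v : Int) (fuel j : Nat)
    (hfuel : 1 ≤ fuel) (hj : j < balls.length) (hv : balls.getD j 0 = v) :
    j + 1 ≤ pvInner balls v fuel j := by
  obtain ⟨f, rfl⟩ : ∃ f, fuel = f + 1 := ⟨fuel - 1, by omega⟩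
  rw [pvInner, if_pos ⟨hj, hv⟩]
  exact pvInner_ge balls v f (j + 1)

-- past the last possible start, the triple scan reports none for any fuel
theorem pvTrip_none (balls : List Int) (fuel i : Nat) (h : balls.length ≤ i + 2) :
    pvFindTrip balls fuel i = none := by
  cases fuel with
  | zero => rfl
  | succ f => rw [pvFindTrip, if_neg (by omega)]

-- the triple scan does not depend on the fuel once the fuel is adequate
theorem pvTrip_fuel (balls : List Int) :
    ∀ f1 f2 i, balls.length ≤ i + 2 + f1 → balls.length ≤ i + 2 + f2 →
    pvFindTrip balls f1 i = pvFindTrip balls f2 i := by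
  intro f1
  induction f1 with
  | zero =>
    intro f2 i h1 _
    rw [pvTrip_none balls 0 i (by omega), pvTrip_none balls f2 i (by omega)]
  | succ f ih =>
    intro f2 i h1 h2
    by_cases hl : i + 2 < balls.length
    · obtain ⟨g, rfl⟩ : ∃ g, f2 = g + 1 := ⟨f2 - 1, by omega⟩
      rw [pvFindTrip, if_pos hl]
      rw [pvFindTrip, if_pos hl]
      split
      · rfl
      · exact ih g (i + 1) (by omega) (by omega)
    · rw [pvTrip_none balls _ i (by omega), pvTrip_none balls _ i (by omega)]

-- a triple at i is reported immediately (any adequate fuel)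
theorem pvTrip_found (balls : List Int) (fuel i : Nat) (hl : i + 2 < balls.length)
    (hfuel : 1 ≤ fuel)
    (ht : balls.getD i 0 = balls.getD (i + 1) 0 ∧ balls.getD (i + 1) 0 = balls.getD (i + 2) 0) :
    pvFindTrip balls fuel i = some i := by
  obtain ⟨f, rfl⟩ : ∃ f, fuel = f + 1 := ⟨fuel - 1, by omega⟩
  rw [pvFindTrip, if_pos hl, if_pos ht]

-- no adjacent equal triple can start inside a run of length ≤ 2, so the scan skips it
theorem pvTrip_skip (balls : List Int) (v : Int) :
    ∀ fuel i j, i ≤ j → j ≤ balls.length → j - i ≤ 2 →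
    (∀ k, i ≤ k → k < j → balls.getD k 0 = v) →
    (j < balls.length → balls.getD j 0 ≠ v) →
    balls.length ≤ i + fuel →
    pvFindTrip balls fuel i = pvFindTrip balls fuel j := by
  intro fuel
  induction fuel with
  | zero =>
    intro i j hij hlen _ _ _ hf
    have : i = j := by omega
    rw [this]
  | succ f ih =>
    intro i j hij hlen hshort hrun hstop hf
    rcases Nat.eq_or_lt_of_le hij with rfl | hlt
    · rfl
    · have hstep : pvFindTrip balls (f + 1) i = pvFindTrip balls f (i + 1) := by
        by_cases hl : i + 2 < balls.length
        · have hiv : balls.getD i 0 = v := hrun i (le_refl _) hlt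
          have hnot : ¬ (balls.getD i 0 = balls.getD (i + 1) 0 ∧
              balls.getD (i + 1) 0 = balls.getD (i + 2) 0) := by
            rintro ⟨e1, e2⟩
            have h1v : balls.getD (i + 1) 0 = v := by rw [← e1, hiv]
            have h2v : balls.getD (i + 2) 0 = v := by rw [← e2, h1v]
            have hi1 : i + 1 < j := by
              rcases Nat.lt_or_ge (i + 1) j with h | h
              · exact h
              · have hej : j = i + 1 := by omega
                rw [← hej] at h1v
                exact absurd h1v (hstop (by omega))
            rcases Nat.lt_or_ge (i + 2) j with h | h
            · omega
            · have hej : j = i + 2 := by omega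
              rw [← hej] at h2v
              exact absurd h2v (hstop (by omega))
          rw [pvFindTrip, if_pos hl, if_neg hnot]
        · rw [pvTrip_none balls _ i (by omega), pvTrip_none balls f (i + 1) (by omega)]
      rw [hstep,
        ih (i + 1) j hlt hlen (by omega) (fun k hk1 hk2 => hrun k (by omega) hk2) hstop (by omega)]
      exact pvTrip_fuel balls f (f + 1) j (by omega) (by omega)

-- with adequate fuel, the boundary search returns the run end j
theorem pvEnd_spec (balls : List Int) (v : Int) (j : Nat) (hj : j ≤ balls.length)
    (hstop : j < balls.length → balls.getD j 0 ≠ v) :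
    ∀ fuel k, k ≤ j → (∀ t, k ≤ t → t < j → balls.getD t 0 = v) →
    balls.length ≤ k + fuel → pvEnd balls v fuel k = j := by
  intro fuel
  induction fuel with
  | zero =>
    intro k hk _ hf
    have : j = balls.length := by omega
    rw [pvEnd, this]
  | succ f ih =>
    intro k hk hrun hf
    by_cases hkl : k < balls.length
    · rcases Nat.eq_or_lt_of_le hk with rfl | hkj
      · rw [pvEnd, if_pos hkl, if_pos (hstop hkl)]
      · have hv : balls.getD k 0 = v := hrun k (le_refl _) hkj
        rw [pvEnd, if_pos hkl, if_neg (not_not_intro hv)]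
        exact ih (k + 1) (by omega) (fun t ht1 ht2 => hrun t (by omega) ht2) (by omega)
    · rw [pvEnd, if_neg hkl]
      omega

theorem pvOuter_eq (balls : List Int) :
    ∀ fuel i, i ≤ balls.length → balls.length + 1 ≤ i + fuel →
    pvOuter balls fuel i =
      (match pvFindTrip balls balls.length i with
       | none => 0
       | some t => ((pvEnd balls (balls.getD t 0) balls.length (t + 3) : Int) - (t : Int))) := by
  intro fuel
  induction fuel with
  | zero => intro i hi hf; omega
  | succ f ih =>
    intro i hi hf
    rw [pvOuter]
    by_cases hcase : i < balls.length - 2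
    · rw [if_pos hcase]
      obtain ⟨h1, h2, h3, h4⟩ :=
        pvInner_spec balls (balls.getD i 0) (balls.length - i) i (by omega) (by omega)
      set j := pvInner balls (balls.getD i 0) (balls.length - i) i with hjdef
      have hj1 : i + 1 ≤ j :=
        pvInner_gt balls (balls.getD i 0) (balls.length - i) i (by omega) (by omega) rfl
      by_cases hret : (j : Int) - (i : Int) ≥ 3
      · rw [if_pos hret]
        have hj3 : i + 3 ≤ j := by omega
        have htrip : pvFindTrip balls balls.length i = some i := by
          refine pvTrip_found balls balls.length i (by omega) (by omega) ?_
          constructor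
          · rw [h3 (i + 1) (by omega) (by omega), h3 i (by omega) (by omega)]
          · rw [h3 (i + 2) (by omega) (by omega), h3 (i + 1) (by omega) (by omega)]
        have hend : pvEnd balls (balls.getD i 0) balls.length (i + 3) = j :=
          pvEnd_spec balls (balls.getD i 0) j h2 h4 balls.length (i + 3)
            hj3 (fun t ht1 ht2 => h3 t (by omega) ht2) (by omega)
        rw [htrip]
        simp only [hend]
      · rw [if_neg hret]
        have hskip : pvFindTrip balls balls.length i = pvFindTrip balls balls.length j :=
          pvTrip_skip balls (balls.getD i 0) balls.length i j h1 h2 (by omega) h3 h4 (by omega)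
        rw [ih j h2 (by omega), hskip]
    · rw [if_neg hcase, pvTrip_none balls balls.length i (by omega)]

-- ===== VERDICT (by name: the statement is the Claim_ definition above) =====
theorem count_destroyed_spec : Claim_equal_count_destroyed := by
  intro balls _
  unfold Spec_count_destroyed count_destroyed count_destroyed_alt
  exact pvOuter_eq balls (balls.length + 1) 0 (by omega) (by omega)
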